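-- pv_equiv track=rewrite | github.com/pobiq/BOJ | 프로그래머스/2/132265. 롤케이크 자르기/롤케이크 자르기.py | solution
-- ===== SOURCE A (Python) =====
-- def solution(topping):
--     answer = 0
--     dic1 = {}
--     dic2 = {}
--
--     for top in topping:
--         dic2[top] = dic2.get(top, 0) + 1
--
--     for top in topping:
--         if dic2[top] == 1:
--             del dic2[top]
--         else:
--             dic2[top] = dic2[top] - 1
--
--         dic1[top] = dic1.get(top, 0) + 1
--
--         if len(dic1) == len(dic2):
--             answer += 1
--
--     return answer
-- ===== SOURCE B (Python) =====
-- def solution(topping):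
--     # backward pass: suffix distinct-count table; right[i] = distinct toppings in topping[i:]
--     right = [0]
--     seen = set()
--     for top in reversed(topping):
--         seen.add(top)
--         right.append(len(seen))
--     right.reverse()
--     # forward pass: grow the left set, compare with the precomputed table
--     answer = 0
--     left = set()
--     for top, r in zip(topping, right[1:]):
--         left.add(top)
--         if len(left) == r:
--             answer += 1
--     return answer
-- ===== Notes on version B (the rewrite author's own statement) =====
-- stated objective: alternative
-- what changed: Replaces A's single forward pass that decrements a full occurrence-counter dict in lockstep with a two-phase scheme: a backward pass precomputing a suffix distinct-count table with a set, then a forward pass growing a left set and comparing its size against the table.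
import Mathlib
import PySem

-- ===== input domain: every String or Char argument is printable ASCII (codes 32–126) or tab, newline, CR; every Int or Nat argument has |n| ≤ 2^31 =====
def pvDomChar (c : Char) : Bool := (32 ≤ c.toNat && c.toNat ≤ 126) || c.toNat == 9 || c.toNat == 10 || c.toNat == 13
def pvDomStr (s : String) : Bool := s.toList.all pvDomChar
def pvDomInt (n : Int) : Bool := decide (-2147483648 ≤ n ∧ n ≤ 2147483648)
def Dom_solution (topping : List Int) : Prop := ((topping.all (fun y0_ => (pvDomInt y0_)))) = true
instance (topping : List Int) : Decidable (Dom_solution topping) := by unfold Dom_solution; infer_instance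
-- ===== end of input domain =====

-- B replaces A's lockstep counter-decrement dictionary with a backward suffix distinct-count
-- table followed by a forward set pass (alternative decomposition, same asymptotic cost).

-- ===== PORT A =====
-- In the second loop Python reads dic2[top] by direct indexing; the key is always present there
-- (its count is ≥ 1), so porting it as getD with default 0 is exact.
def solution (topping : List Int) : Int :=
  let dic2 := topping.foldl (fun d top => d.insert top (d.getD top 0 + 1)) PySem.Dict.empty
  let st := topping.foldl
    (fun (st : Int × PySem.Dict Int Int × PySem.Dict Int Int) top =>
      let dic2' := if st.2.2.getD top 0 == 1 then st.2.2.erase top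
                   else st.2.2.insert top (st.2.2.getD top 0 - 1)
      let dic1' := st.2.1.insert top (st.2.1.getD top 0 + 1)
      (if dic1'.size == dic2'.size then st.1 + 1 else st.1, dic1', dic2'))
    (0, PySem.Dict.empty, dic2)
  st.1

-- ===== PORT B =====
def solution_alt (topping : List Int) : Int :=
  -- backward pass: build right with right[i] = number of distinct toppings in topping[i:]
  let back := topping.reverse.foldl
    (fun (st : PySem.Set Int × List Int) top =>
      let seen := PySem.Set.add st.1 top
      (seen, st.2 ++ [(seen.length : Int)]))
    (PySem.Set.empty, [(0 : Int)])
  let right := back.2.reverse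
  -- forward pass: grow the left set, compare with the precomputed table
  let fwd := (topping.zip (PySem.List.slice right (some 1) none)).foldl
    (fun (st : PySem.Set Int × Int) p =>
      let left := PySem.Set.add st.1 p.1
      (left, if (left.length : Int) == p.2 then st.2 + 1 else st.2))
    (PySem.Set.empty, 0)
  fwd.2

-- ===== PRECONDITION & SPEC =====
def Spec_solution (topping : List Int) (out : Int) : Prop := out = solution_alt topping
instance (topping : List Int) (out : Int) : Decidable (Spec_solution topping out) := by unfold Spec_solution; infer_instance

-- ===== CLAIM (what is proved, stated in full; the proofs are below) =====
def Claim_equal_solution : Prop := ∀ (topping : List Int), Dom_solution topping → Spec_solution topping (solution topping)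

-- ===== LEMMAS AND PROOFS =====

-- number of distinct elements of xs
def Dcnt (xs : List Int) : Nat := xs.toFinset.card

-- the common recursive specification: walking the list with the set s of already-seen
-- left toppings, count positions where the left distinct count equals the right one
def countSpec : List Int → PySem.Set Int → Int
  | [], _ => 0
  | t :: r, s => (if (PySem.Set.add s t).length = Dcnt r then 1 else 0) + countSpec r (PySem.Set.add s t)

-- suffix tables used to characterise B's backward pass
def suffInts : List Int → List Int
  | [] => []
  | t :: r => ((Dcnt (t :: r) : Int)) :: suffInts r

def tailInts : List Int → List Int
  | [] => []
  | _ :: r => ((Dcnt r : Int)) :: tailInts r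

theorem toFinset_add (s : List Int) (t : Int) :
    (PySem.Set.add s t).toFinset = insert t s.toFinset := by
  rw [PySem.Set.add_eq_ite]
  split_ifs with h
  · ext x
    simp only [List.mem_toFinset, Finset.mem_insert]
    constructor
    · exact fun hx => Or.inr hx
    · rintro (rfl | hx)
      · exact h
      · exact hx
  · ext x
    simp [List.mem_toFinset, Finset.mem_insert]

theorem len_eq_Dcnt {s xs : List Int} (hn : s.Nodup) (hf : s.toFinset = xs.toFinset) :
    s.length = Dcnt xs := by
  rw [Dcnt, ← hf, List.toFinset_card_of_nodup hn]

theorem suff_append_zero (xs : List Int) :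
    suffInts xs ++ [(0 : Int)] = ((Dcnt xs : Int)) :: tailInts xs := by
  induction xs with
  | nil => simp [suffInts, tailInts, Dcnt]
  | cons t r ih => simp [suffInts, tailInts, ih]

theorem backB (xs : List Int) :
    ∃ S : PySem.Set Int,
      xs.foldr
        (fun top st =>
          ((PySem.Set.add st.1 top : PySem.Set Int),
            st.2 ++ [((PySem.Set.add st.1 top).length : Int)]))
        (PySem.Set.empty, [(0 : Int)])
      = (S, [(0 : Int)] ++ (suffInts xs).reverse)
      ∧ S.Nodup ∧ S.toFinset = xs.toFinset := by
  induction xs with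
  | nil => exact ⟨PySem.Set.empty, rfl, List.nodup_nil, rfl⟩
  | cons t r ih =>
    obtain ⟨S, heq, hnd, hfin⟩ := ih
    refine ⟨PySem.Set.add S t, ?_, (PySem.Set.nodup_add S t hnd), ?_⟩
    · rw [List.foldr_cons, heq]
      have hlen : (PySem.Set.add S t).length = Dcnt (t :: r) :=
        len_eq_Dcnt ((PySem.Set.nodup_add S t hnd))
          (by rw [toFinset_add, hfin, List.toFinset_cons])
      simp [suffInts, hlen, List.reverse_cons]
    · rw [toFinset_add, hfin, List.toFinset_cons]

theorem fwdB (xs : List Int) (s : PySem.Set Int) (a : Int) :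
    ((xs.zip (tailInts xs)).foldl
      (fun (st : PySem.Set Int × Int) p =>
        ((PySem.Set.add st.1 p.1 : PySem.Set Int),
          if ((PySem.Set.add st.1 p.1).length : Int) == p.2 then st.2 + 1 else st.2))
      (s, a)).2 = a + countSpec xs s := by
  induction xs generalizing s a with
  | nil => simp [countSpec, tailInts]
  | cons t r ih =>
    show ((r.zip (tailInts r)).foldl _
      (PySem.Set.add s t,
        if ((PySem.Set.add s t).length : Int) == ((Dcnt r : Int)) then a + 1 else a)).2 = _
    rw [ih]
    simp only [countSpec, beq_iff_eq, Nat.cast_inj]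
    split_ifs <;> ring

-- the PySem book has no lemmas for Dict.erase; these two are proved here
theorem pv_find?_filter_ne (k k' : Int) (h : ¬ k' = k) (items : List (Int × Int)) :
    List.find? (fun p => p.1 == k') (items.filter (fun p => !(p.1 == k)))
      = List.find? (fun p => p.1 == k') items := by
  induction items with
  | nil => rfl
  | cons p rest ih =>
    by_cases hp : p.1 = k
    · have hq : ¬ p.1 = k' := fun hh => h (hh ▸ hp)
      have h' : ¬ k = k' := fun hh => h hh.symm
      simp [hp, ih, h']
    · by_cases hq : p.1 = k'
      · simp [hq, h]
      · simp [hp, hq, ih]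

theorem get?_erase (d : PySem.Dict Int Int) (k k' : Int) :
    (d.erase k).get? k' = if k' = k then none else d.get? k' := by
  by_cases hk : k' = k
  · subst hk
    simp [PySem.Dict.erase, PySem.Dict.get?]
  · simp [PySem.Dict.erase, PySem.Dict.get?, pv_find?_filter_ne k k' hk, hk]

theorem keys_erase (d : PySem.Dict Int Int) (k : Int) :
    (d.erase k).keys = d.keys.filter (fun x => x ≠ k) := by
  obtain ⟨items⟩ := d
  induction items with
  | nil => simp [PySem.Dict.erase, PySem.Dict.keys]
  | cons p rest ih =>
    by_cases hp : p.1 = k <;>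
      simp_all [PySem.Dict.erase, PySem.Dict.keys]

theorem size_eq_keys_length (d : PySem.Dict Int Int) : d.size = d.keys.length := by
  simp [PySem.Dict.size, PySem.Dict.keys]

-- A's second loop: dic1's key list is exactly B's left set, dic2 is a counter of the
-- unprocessed suffix; the answer accumulates countSpec
theorem loopA (rem : List Int) (ans : Int) (d1 d2 : PySem.Dict Int Int) (s : List Int)
    (h1 : d1.keys = s)
    (hcnt : ∀ k, d2.getD k 0 = (rem.count k : Int))
    (hnd : d2.keys.Nodup)
    (hmem : ∀ k, k ∈ d2.keys ↔ k ∈ rem) :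
    (rem.foldl
      (fun (st : Int × PySem.Dict Int Int × PySem.Dict Int Int) top =>
        let dic2' := if st.2.2.getD top 0 == 1 then st.2.2.erase top
                     else st.2.2.insert top (st.2.2.getD top 0 - 1)
        let dic1' := st.2.1.insert top (st.2.1.getD top 0 + 1)
        (if dic1'.size == dic2'.size then st.1 + 1 else st.1, dic1', dic2'))
      (ans, d1, d2)).1 = ans + countSpec rem s := by
  induction rem generalizing ans d1 d2 s with
  | nil => simp [countSpec]
  | cons t rest ih =>
    rw [List.foldl_cons]
    -- the updated dictionaries of this iteration
    set d2' := if d2.getD t 0 == 1 then d2.erase t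
               else d2.insert t (d2.getD t 0 - 1) with hd2'
    set d1' := d1.insert t (d1.getD t 0 + 1) with hd1'
    -- d1's key list evolves exactly like PySem.Set.add
    have hk1 : d1'.keys = PySem.Set.add s t := by
      by_cases hm : t ∈ s
      · rw [hd1', PySem.Dict.keys_insert_of_contains, h1, PySem.Set.add_of_mem hm]
        rw [PySem.Dict.contains_eq_decide_mem_keys, h1]; simpa
      · rw [hd1', PySem.Dict.keys_insert_of_not_contains, h1, PySem.Set.add_of_not_mem hm]
        rw [PySem.Dict.contains_eq_decide_mem_keys, h1]; simpa
    have hct : d2.getD t 0 = ((rest.count t : Int) + 1) := by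
      rw [hcnt t]; simp
    -- the three invariants for the updated d2'
    have hcnt' : ∀ k, d2'.getD k 0 = (rest.count k : Int) := by
      intro k
      by_cases h1c : rest.count t = 0
      · have hbr : (d2.getD t 0 == 1) = true := by rw [hct, h1c]; simp
        rw [hd2', if_pos hbr, PySem.Dict.getD_eq_get?_getD, get?_erase]
        by_cases hk : k = t
        · subst hk; simp [h1c]
        · rw [if_neg hk, ← PySem.Dict.getD_eq_get?_getD, hcnt k]
          have hk' : ¬ t = k := fun h => hk h.symm
          simp [hk']
      · have hbr : (d2.getD t 0 == 1) = false := by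
          rw [hct]; simp; omega
        rw [hd2', if_neg (by simp [hbr])]
        rw [PySem.Dict.getD_insert]
        by_cases hk : k = t
        · subst hk; rw [if_pos rfl, hct]; ring
        · rw [if_neg hk, hcnt k]
          have hk' : ¬ t = k := fun h => hk h.symm
          simp [hk']
    have hmem' : ∀ k, k ∈ d2'.keys ↔ k ∈ rest := by
      intro k
      by_cases h1c : rest.count t = 0
      · have htr : t ∉ rest := by rwa [← List.count_eq_zero]
        have hbr : (d2.getD t 0 == 1) = true := by rw [hct, h1c]; simp
        rw [hd2', if_pos hbr, keys_erase]
        simp only [List.mem_filter, hmem, List.mem_cons, decide_eq_true_eq]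
        constructor
        · rintro ⟨rfl | hk, hne⟩
          · exact absurd rfl hne
          · exact hk
        · exact fun hk => ⟨Or.inr hk, fun he => htr (he ▸ hk)⟩
      · have htr : t ∈ rest := by rwa [← List.count_pos_iff, Nat.pos_iff_ne_zero]
        have hbr : (d2.getD t 0 == 1) = false := by rw [hct]; simp; omega
        rw [hd2', if_neg (by simp [hbr]), PySem.Dict.keys_insert_of_contains]
        · rw [hmem k]
          simp only [List.mem_cons]
          constructor
          · rintro (rfl | hk)
            · exact htr
            · exact hk
          · exact Or.inr
        · rw [PySem.Dict.contains_eq_decide_mem_keys]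
          simp [hmem t]
    have hnd' : d2'.keys.Nodup := by
      by_cases h1c : rest.count t = 0
      · have hbr : (d2.getD t 0 == 1) = true := by rw [hct, h1c]; simp
        rw [hd2', if_pos hbr, keys_erase]
        exact hnd.filter _
      · have hbr : (d2.getD t 0 == 1) = false := by rw [hct]; simp; omega
        rw [hd2', if_neg (by simp [hbr]), PySem.Dict.keys_insert_of_contains]
        · exact hnd
        · rw [PySem.Dict.contains_eq_decide_mem_keys]
          simp [hmem t]
    -- the comparison of the two sizes is countSpec's condition
    have hsz : (d1'.size == d2'.size) = ((PySem.Set.add s t).length = Dcnt rest) := by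
      have h2 : d2'.size = Dcnt rest := by
        rw [size_eq_keys_length]
        refine len_eq_Dcnt hnd' ?_
        ext x; simp [List.mem_toFinset, hmem' x]
      rw [size_eq_keys_length, hk1, h2]
      simp
    rw [ih _ _ _ _ hk1 hcnt' hnd' hmem']
    simp only [countSpec, hsz]
    split_ifs <;> ring

-- ===== VERDICT (by name: the statement is the Claim_ definition above) =====
theorem solution_spec : Claim_equal_solution := by
  unfold Claim_equal_solution Spec_solution
  intro topping _
  have hA : solution topping = 0 + countSpec topping PySem.Set.empty := by
    unfold solution
    rw [PySem.Dict.foldl_insert_getD_add_one_eq_counter]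
    exact loopA topping 0 PySem.Dict.empty (PySem.Dict.counter topping) []
      (PySem.Dict.keys_empty)
      (fun k => by rw [PySem.Dict.getD_counter])
      (PySem.Dict.nodup_keys_counter topping)
      (fun k => by
        rw [PySem.Dict.keys_counter]
        exact PySem.Set.mem_ofList topping k)
  have hB : solution_alt topping = 0 + countSpec topping PySem.Set.empty := by
    unfold solution_alt
    rw [List.foldl_reverse]
    obtain ⟨S, heq, _, _⟩ := backB topping
    rw [heq]
    have hright : ([(0 : Int)] ++ (suffInts topping).reverse).reverse
        = suffInts topping ++ [(0 : Int)] := by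
      simp
    simp only [hright, PySem.List.slice_from_one, suff_append_zero, List.tail_cons]
    exact fwdB topping PySem.Set.empty 0
  rw [hA, hB]
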